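-- pv_equiv track=rewrite | github.com/USCDataScience/parser-indexer-py | src/parserindexer/indexer.py | get_primary_author
-- ===== SOURCE A (Python) =====
-- import string
--
-- def get_primary_author(au):
--     '''
--     gets the primary author name.
--     Heuristic: first phrase in 'authors' consisting of words longer than 1 char
--     '''
--     auwords = au.split()
--     pa = ''
--     in_last_name = False
--     for auw in auwords:
--         if len(auw) > 1:
--             if in_last_name:
--                 pa += (' ' + auw)
--             else:
--                 pa = auw
--                 in_last_name = True
--         else:
--             if in_last_name:  # Done!
--                 break
--     return string.capwords(pa)
-- ===== SOURCE B (Python) =====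
-- import string
--
-- def get_primary_author(au):
--     # two-phase decomposition: drop leading short words, then take the
--     # maximal prefix of long words; capwords the joined run
--     words = au.split()
--     while words and len(words[0]) <= 1:
--         words = words[1:]
--     run = []
--     for w in words:
--         if not len(w) > 1:
--             break
--         run.append(w)
--     return string.capwords(' '.join(run))
-- ===== Notes on version B (the rewrite author's own statement) =====
-- stated objective: alternative
-- what changed: Replaces A's single-pass loop with an in_last_name flag and string concatenation by a two-phase decomposition: drop the leading words of length <= 1, then collect the maximal prefix of words longer than 1 char, and capwords the joined run.
import Mathlib
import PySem

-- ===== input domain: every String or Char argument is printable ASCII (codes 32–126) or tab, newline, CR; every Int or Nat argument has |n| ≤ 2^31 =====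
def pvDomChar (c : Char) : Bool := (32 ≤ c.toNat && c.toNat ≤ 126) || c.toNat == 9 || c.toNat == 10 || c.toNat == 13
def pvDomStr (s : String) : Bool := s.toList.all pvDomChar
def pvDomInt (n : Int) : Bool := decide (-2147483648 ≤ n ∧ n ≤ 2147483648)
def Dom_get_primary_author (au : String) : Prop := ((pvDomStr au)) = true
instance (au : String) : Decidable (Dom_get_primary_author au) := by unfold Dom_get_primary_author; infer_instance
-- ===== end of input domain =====

-- B replaces A's in_last_name flag loop by a two-phase drop-short/take-long decomposition (objective: alternative, same O(n) cost).
-- ===== PORT A =====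
-- string.capwords(s) = ' '.join(w.capitalize() for w in s.split()); exact on the ASCII domain
def pvCapChars (cs : List Char) : List Char :=
  match cs with
  | [] => []
  | c :: rest => PySem.Chars.upperChar c :: PySem.Chars.lower rest

def pvCapwords (s : List Char) : List Char :=
  PySem.Chars.join [' '] ((PySem.Chars.split₀ s).map pvCapChars)

-- A's flag loop: pa accumulator, in_last_name flag, break = return pa
def pvLoopA : List String → List Char → Bool → List Char
  | [], pa, _ => pa
  | auw :: rest, pa, inName =>
    if 1 < PySem.Str.len auw then
      if inName then pvLoopA rest (pa ++ (' ' :: auw.toList)) true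
      else pvLoopA rest auw.toList true
    else
      if inName then pa
      else pvLoopA rest pa inName

def get_primary_author (au : String) : String :=
  String.ofList (pvCapwords (pvLoopA (PySem.Str.split₀ au) [] false))

-- ===== PORT B =====
-- Source B phase 1: while words and len(words[0]) <= 1: words = words[1:]
def pvDropShort : List String → List String
  | [] => []
  | w :: ws => if PySem.Str.len w ≤ 1 then pvDropShort ws else w :: ws

-- Source B phase 2: collect words while len(w) > 1, break at the first short one
def pvTakeLong : List String → List String
  | [] => []
  | w :: ws => if 1 < PySem.Str.len w then w :: pvTakeLong ws else []

def get_primary_author_alt (au : String) : String :=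
  String.ofList (pvCapwords
    (PySem.Chars.join [' ']
      ((pvTakeLong (pvDropShort (PySem.Str.split₀ au))).map String.toList)))

-- ===== PRECONDITION & SPEC =====
def Spec_get_primary_author (au : String) (out : String) : Prop := out = get_primary_author_alt au
instance (au : String) (out : String) : Decidable (Spec_get_primary_author au out) := by unfold Spec_get_primary_author; infer_instance

-- ===== CLAIM (what is proved, stated in full; the proofs are below) =====
def Claim_equal_get_primary_author : Prop := ∀ (au : String), Dom_get_primary_author au → Spec_get_primary_author au (get_primary_author au)

-- ===== LEMMAS AND PROOFS =====
lemma pv_join_cons (x : List Char) (xs : List (List Char)) :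
    PySem.Chars.join [' '] (x :: xs) = x ++ (xs.map (fun c => ' ' :: c)).flatten := by
  induction xs generalizing x with
  | nil => simp [PySem.Chars.join_singleton]
  | cons y ys ih => simp [PySem.Chars.join_cons_cons, ih]

lemma pv_loopA_true (ws : List String) (pa : List Char) :
    pvLoopA ws pa true = pa ++ ((pvTakeLong ws).map (fun w => ' ' :: w.toList)).flatten := by
  induction ws generalizing pa with
  | nil => simp [pvLoopA, pvTakeLong]
  | cons w ws ih =>
    by_cases h : 1 < w.length
    · simp [pvLoopA, pvTakeLong, h, ih]
    · simp [pvLoopA, pvTakeLong, h]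

lemma pv_loopA_false (ws : List String) :
    pvLoopA ws [] false = pvLoopA (pvDropShort ws) [] false := by
  induction ws with
  | nil => rfl
  | cons w ws ih =>
    by_cases h : 1 < w.length
    · simp [pvLoopA, pvDropShort, h, Nat.not_le.mpr h]
    · simp [pvLoopA, pvDropShort, h, Nat.le_of_not_lt h, ih]

lemma pv_dropShort_head (ws : List String) :
    pvDropShort ws = [] ∨
      ∃ w rest, pvDropShort ws = w :: rest ∧ 1 < PySem.Str.len w := by
  induction ws with
  | nil => exact Or.inl rfl
  | cons w ws ih =>
    by_cases h : w.length ≤ 1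
    · simpa [pvDropShort, h] using ih
    · exact Or.inr ⟨w, ws, by simp [pvDropShort, h], by simpa [PySem.Str.len_eq] using Nat.lt_of_not_le h⟩

lemma pv_core (ws : List String) :
    pvLoopA ws [] false =
      PySem.Chars.join [' '] ((pvTakeLong (pvDropShort ws)).map String.toList) := by
  rw [pv_loopA_false]
  rcases pv_dropShort_head ws with h | ⟨w, rest, h, hw⟩
  · simp [h, pvLoopA, pvTakeLong, PySem.Chars.join_nil]
  · rw [h]
    have hw' : 1 < w.length := by simpa [PySem.Str.len_eq] using hw
    simp [pvLoopA, pvTakeLong, hw', pv_loopA_true, pv_join_cons]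
    rfl

-- ===== VERDICT (by name: the statement is the Claim_ definition above) =====
theorem get_primary_author_spec : Claim_equal_get_primary_author := by
  intro au _
  unfold Spec_get_primary_author get_primary_author get_primary_author_alt
  rw [pv_core]
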